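-- pv_equiv track=rewrite | github.com/Afia-Anjum/Leetcode_solutions | find_unique_numbers_of_x_with_a_constraint.py | find_unique_numbers_of_x_with_a_constraint
-- ===== SOURCE A (Python) =====
-- def find_unique_numbers_of_x_with_a_constraint(nums):
--     dict={}
--     answer=[]
--     for i in range(len(nums)):
--         dict[nums[i]]=i
--     for key in dict.keys():
--         if key+1 in dict.keys() or key-1 in dict.keys():
--             continue
--         else:
--             answer.append(key)
--     return answer
-- ===== SOURCE B (Python) =====
-- def find_unique_numbers_of_x_with_a_constraint(nums):
--     firsts = list(dict.fromkeys(nums))   # distinct values in first-occurrence order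
--     s = sorted(firsts)                   # strictly increasing, since firsts has no duplicates
--     isolated = set()
--     for i in range(len(s)):
--         # in a strictly increasing list, v-1/v+1 can only sit immediately next to v
--         if (i == 0 or s[i - 1] != s[i] - 1) and (i == len(s) - 1 or s[i + 1] != s[i] + 1):
--             isolated.add(s[i])
--     return [v for v in firsts if v in isolated]
-- ===== Notes on version B (the rewrite author's own statement) =====
-- stated objective: alternative
-- what changed: B replaces A's hash-based neighbor probes (dict of all values, then lookups of key+1/key-1) by a sort-then-adjacent-scan: it sorts the distinct values and marks a value isolated when neither sorted neighbor is consecutive to it, then emits the marked values in first-occurrence order.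
import Mathlib
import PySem

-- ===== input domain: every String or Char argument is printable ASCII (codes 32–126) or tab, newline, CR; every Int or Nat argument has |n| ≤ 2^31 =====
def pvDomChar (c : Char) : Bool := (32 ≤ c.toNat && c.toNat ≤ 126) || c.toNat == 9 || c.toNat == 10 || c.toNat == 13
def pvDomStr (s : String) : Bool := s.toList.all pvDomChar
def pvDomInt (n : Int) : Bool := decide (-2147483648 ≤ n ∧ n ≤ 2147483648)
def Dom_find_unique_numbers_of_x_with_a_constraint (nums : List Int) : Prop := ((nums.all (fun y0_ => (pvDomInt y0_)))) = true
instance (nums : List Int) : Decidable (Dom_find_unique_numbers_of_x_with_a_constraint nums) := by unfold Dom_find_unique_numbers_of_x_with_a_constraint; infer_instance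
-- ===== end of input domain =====

-- B replaces A's hash probes for key±1 by a sort-then-adjacent-scan over the distinct
-- values, then emits in first-occurrence order (objective: alternative algorithm).

-- ===== PORT A =====
-- dict built by 'for i in range(len(nums)): dict[nums[i]] = i', then a walk over dict.keys()
def find_unique_numbers_of_x_with_a_constraint (nums : List Int) : List Int :=
  let d := (PySem.List.enumerate nums).foldl (fun d p => d.insert p.2 p.1)
             (PySem.Dict.empty : PySem.Dict Int Int)
  d.keys.foldl
    (fun answer key =>
      if d.contains (key + 1) || d.contains (key - 1) then answer
      else answer ++ [key]) []

-- ===== PORT B =====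
-- firsts = list(dict.fromkeys(nums)); s = sorted(firsts); mark s[i] isolated when neither
-- sorted neighbor is consecutive to it; return firsts filtered by the isolated set
def find_unique_numbers_of_x_with_a_constraint_alt (nums : List Int) : List Int :=
  let firsts := PySem.List.dedup nums
  let s := PySem.List.sorted firsts (fun x => x) false
  let isolated := (PySem.List.pyRange 0 s.length 1).foldl
    (fun iso i =>
      if (decide (i = 0) || decide (PySem.List.pyGetD s (i - 1) 0 ≠ PySem.List.pyGetD s i 0 - 1)) &&
         (decide (i = (s.length : Int) - 1) || decide (PySem.List.pyGetD s (i + 1) 0 ≠ PySem.List.pyGetD s i 0 + 1))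
      then PySem.Set.add iso (PySem.List.pyGetD s i 0) else iso)
    (PySem.Set.empty : PySem.Set Int)
  firsts.filter (fun v => PySem.Set.contains isolated v)

-- ===== PRECONDITION & SPEC =====
def Spec_find_unique_numbers_of_x_with_a_constraint (nums : List Int) (out : List Int) : Prop := out = find_unique_numbers_of_x_with_a_constraint_alt nums
instance (nums : List Int) (out : List Int) : Decidable (Spec_find_unique_numbers_of_x_with_a_constraint nums out) := by unfold Spec_find_unique_numbers_of_x_with_a_constraint; infer_instance

-- ===== CLAIM (what is proved, stated in full; the proofs are below) =====
def Claim_equal_find_unique_numbers_of_x_with_a_constraint : Prop := ∀ (nums : List Int), Dom_find_unique_numbers_of_x_with_a_constraint nums → Spec_find_unique_numbers_of_x_with_a_constraint nums (find_unique_numbers_of_x_with_a_constraint nums)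

-- ===== LEMMAS AND PROOFS =====

-- A-side: the dict's key view is set(nums) in first-occurrence order
theorem pvKeys_eq (nums : List Int) :
    ((PySem.List.enumerate nums).foldl (fun d p => d.insert p.2 p.1)
        (PySem.Dict.empty : PySem.Dict Int Int)).keys = PySem.Set.ofList nums := by
  rw [PySem.Dict.keys_foldl_insert_key (key := Prod.snd)]
  simp [PySem.List.map_snd_enumerate, PySem.Set.update_nil_left]

theorem pvContains_eq (nums : List Int) (x : Int) :
    ((PySem.List.enumerate nums).foldl (fun d p => d.insert p.2 p.1)
        (PySem.Dict.empty : PySem.Dict Int Int)).contains x = decide (x ∈ nums) := by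
  rw [PySem.Dict.contains_eq_decide_mem_keys, pvKeys_eq]
  simp [PySem.Set.mem_ofList]

-- A's answer loop is a filter over the keys
theorem pvFoldl_filter (c : Int → Bool) (l : List Int) : ∀ (init : List Int),
    l.foldl (fun ans k => if c k then ans else ans ++ [k]) init
      = init ++ l.filter (fun k => !(c k)) := by
  induction l with
  | nil => intro init; simp
  | cons n t ih =>
    intro init
    by_cases h : c n = true <;> simp [h, ih]

-- B-side: membership in the conditionally-built isolated set
theorem pvMem_fold_add (c : Int → Bool) (f : Int → Int) (l : List Int) :
    ∀ (s0 : PySem.Set Int) (x : Int),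
    (x ∈ l.foldl (fun iso i => if c i then PySem.Set.add iso (f i) else iso) s0)
      ↔ x ∈ s0 ∨ ∃ i ∈ l, c i = true ∧ f i = x := by
  induction l with
  | nil => intro s0 x; simp
  | cons n t ih =>
    intro s0 x
    rw [List.foldl_cons]
    by_cases h : c n = true
    · rw [if_pos h, ih]
      simp [PySem.Set.mem_add, h]
      tauto
    · rw [if_neg h, ih]
      simp [h]

theorem pvGetD_nat (s : List Int) (k : Nat) (hk : k < s.length) :
    PySem.List.pyGetD s (k : Int) 0 = s[k] := by
  simp [PySem.List.pyGetD_natCast, hk]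

-- strictly increasing list: v-1 present iff it is the immediate left neighbor
theorem pvLeft_nbr (s : List Int) (hp : s.Pairwise (· < ·)) (j : Nat) (hj : j < s.length) :
    (s[j] - 1 ∈ s) ↔ (j ≠ 0 ∧ ∃ h : j - 1 < s.length, s[j-1] = s[j] - 1) := by
  have mono := List.pairwise_iff_getElem.mp hp
  constructor
  · intro hm
    obtain ⟨k, hk, hke⟩ := List.mem_iff_getElem.mp hm
    have hkj : k < j := by
      rcases lt_trichotomy k j with h | h | h
      · exact h
      · exfalso; subst h; omega
      · exact absurd (mono j k hj hk h) (by omega)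
    have h1 : j - 1 < s.length := by omega
    refine ⟨by omega, h1, ?_⟩
    have hle : s[k] ≤ s[j-1] := by
      rcases Nat.lt_or_ge k (j-1) with h | h
      · exact le_of_lt (mono k (j-1) hk h1 h)
      · have : k = j - 1 := by omega
        subst this; rfl
    have hlt : s[j-1] < s[j] := mono (j-1) j h1 hj (by omega)
    omega
  · rintro ⟨h0, h, he⟩
    rw [← he]; exact List.getElem_mem _

-- strictly increasing list: v+1 present iff it is the immediate right neighbor
theorem pvRight_nbr (s : List Int) (hp : s.Pairwise (· < ·)) (j : Nat) (hj : j < s.length) :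
    (s[j] + 1 ∈ s) ↔ (∃ h : j + 1 < s.length, s[j+1] = s[j] + 1) := by
  have mono := List.pairwise_iff_getElem.mp hp
  constructor
  · intro hm
    obtain ⟨k, hk, hke⟩ := List.mem_iff_getElem.mp hm
    have hkj : j < k := by
      rcases lt_trichotomy j k with h | h | h
      · exact h
      · exfalso; subst h; omega
      · exact absurd (mono k j hk hj h) (by omega)
    have h1 : j + 1 < s.length := by omega
    refine ⟨h1, ?_⟩
    have hle : s[j+1] ≤ s[k] := by
      rcases Nat.lt_or_ge (j+1) k with h | h
      · exact le_of_lt (mono (j+1) k h1 hk h)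
      · have : j + 1 = k := by omega
        subst this; rfl
    have hlt : s[j] < s[j+1] := mono j (j+1) hj h1 (by omega)
    omega
  · rintro ⟨h, he⟩
    rw [← he]; exact List.getElem_mem _

-- B's loop condition at index j says exactly 's[j]-1 and s[j]+1 are absent'
theorem pvCond_iff (s : List Int) (hp : s.Pairwise (· < ·)) (j : Nat) (hj : j < s.length) :
    ((decide ((j:Int) = 0) || decide (PySem.List.pyGetD s ((j:Int) - 1) 0 ≠ PySem.List.pyGetD s (j:Int) 0 - 1)) &&
     (decide ((j:Int) = (s.length:Int) - 1) || decide (PySem.List.pyGetD s ((j:Int) + 1) 0 ≠ PySem.List.pyGetD s (j:Int) 0 + 1))) = true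
    ↔ (s[j] - 1 ∉ s ∧ s[j] + 1 ∉ s) := by
  have hg : PySem.List.pyGetD s (j:Int) 0 = s[j] := pvGetD_nat s j hj
  rw [pvLeft_nbr s hp j hj, pvRight_nbr s hp j hj]
  simp only [Bool.and_eq_true, Bool.or_eq_true, decide_eq_true_eq, hg]
  constructor
  · rintro ⟨h1, h2⟩
    constructor
    · rintro ⟨hj0, hlt, he⟩
      rcases h1 with h1 | h1
      · exact hj0 (by exact_mod_cast h1)
      · apply h1
        have hc : ((j:Int) - 1) = ((j-1 : Nat) : Int) := by
          have : 1 ≤ j := Nat.one_le_iff_ne_zero.mpr hj0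
          push_cast [this]; ring
        rw [hc, pvGetD_nat s (j-1) hlt, he]
    · rintro ⟨hlt, he⟩
      rcases h2 with h2 | h2
      · omega
      · apply h2
        have hc : ((j:Int) + 1) = ((j+1 : Nat) : Int) := by push_cast; ring
        rw [hc, pvGetD_nat s (j+1) hlt, he]
  · rintro ⟨h1, h2⟩
    constructor
    · by_cases hj0 : j = 0
      · left; exact_mod_cast congrArg Nat.cast hj0
      · right
        intro he
        apply h1
        refine ⟨hj0, by omega, ?_⟩
        have hc : ((j:Int) - 1) = ((j-1 : Nat) : Int) := by
          have : 1 ≤ j := Nat.one_le_iff_ne_zero.mpr hj0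
          push_cast [this]; ring
        rw [hc, pvGetD_nat s (j-1) (by omega)] at he
        exact he
    · by_cases hl : j + 1 < s.length
      · right
        intro he
        apply h2
        refine ⟨hl, ?_⟩
        have hc : ((j:Int) + 1) = ((j+1 : Nat) : Int) := by push_cast; ring
        rw [hc, pvGetD_nat s (j+1) hl] at he
        exact he
      · left; omega

-- ===== VERDICT (by name: the statement is the Claim_ definition above) =====
theorem find_unique_numbers_of_x_with_a_constraint_spec : Claim_equal_find_unique_numbers_of_x_with_a_constraint := by
  intro nums _
  unfold Spec_find_unique_numbers_of_x_with_a_constraint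
  unfold find_unique_numbers_of_x_with_a_constraint find_unique_numbers_of_x_with_a_constraint_alt
  simp only
  rw [pvKeys_eq, pvFoldl_filter]
  simp only [List.nil_append, ← PySem.List.dedup_eq_ofList]
  apply List.filter_congr
  intro v hv
  set s := PySem.List.sorted (PySem.List.dedup nums) (fun x => x) false with hs
  have hp : s.Pairwise (· < ·) := by
    rw [hs, PySem.List.dedup_eq_ofList]
    exact PySem.List.sorted_ofList_pairwise_lt (xs := nums)
  have hmem_s : ∀ x : Int, x ∈ s ↔ x ∈ nums := by
    intro x
    rw [hs]
    simp [PySem.List.mem_sorted]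
  rw [pvContains_eq, pvContains_eq]
  rw [PySem.Set.contains, List.contains_eq_mem]
  have hvn : v ∈ nums := (PySem.List.mem_dedup nums v).mp hv
  have hiso := pvMem_fold_add
      (fun i => (decide (i = 0) || decide (PySem.List.pyGetD s (i - 1) 0 ≠ PySem.List.pyGetD s i 0 - 1)) &&
         (decide (i = (s.length : Int) - 1) || decide (PySem.List.pyGetD s (i + 1) 0 ≠ PySem.List.pyGetD s i 0 + 1)))
      (fun i => PySem.List.pyGetD s i 0)
      (PySem.List.pyRange 0 (s.length : Int) 1) (PySem.Set.empty) v
  have hchar : (v ∈ (PySem.List.pyRange 0 (s.length : Int) 1).foldl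
      (fun iso i =>
        if (decide (i = 0) || decide (PySem.List.pyGetD s (i - 1) 0 ≠ PySem.List.pyGetD s i 0 - 1)) &&
           (decide (i = (s.length : Int) - 1) || decide (PySem.List.pyGetD s (i + 1) 0 ≠ PySem.List.pyGetD s i 0 + 1))
        then PySem.Set.add iso (PySem.List.pyGetD s i 0) else iso)
      (PySem.Set.empty : PySem.Set Int))
      ↔ (¬ (v + 1) ∈ nums ∧ ¬ (v - 1) ∈ nums) := by
    rw [hiso]
    simp only [PySem.Set.empty]
    constructor
    · rintro (h | ⟨i, hi, hc, hf⟩)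
      · simp at h
      · rw [PySem.List.mem_pyRange_one] at hi
        obtain ⟨hi0, hilen⟩ := hi
        have hj : i.toNat < s.length := by omega
        have hij : i = (i.toNat : Int) := by omega
        rw [hij] at hc hf
        rw [pvGetD_nat s i.toNat hj] at hf
        have hcc := (pvCond_iff s hp i.toNat hj).mp hc
        rw [hf] at hcc
        exact ⟨fun h => hcc.2 ((hmem_s _).mpr h), fun h => hcc.1 ((hmem_s _).mpr h)⟩
    · rintro ⟨h1, h2⟩
      right
      have hvs : v ∈ s := (hmem_s v).mpr hvn
      obtain ⟨j, hj, hje⟩ := List.mem_iff_getElem.mp hvs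
      refine ⟨(j : Int), ?_, ?_, ?_⟩
      · rw [PySem.List.mem_pyRange_one]; constructor <;> [positivity; exact_mod_cast hj]
      · exact (pvCond_iff s hp j hj).mpr
          ⟨by rw [hje]; exact fun h => h2 ((hmem_s _).mp h),
           by rw [hje]; exact fun h => h1 ((hmem_s _).mp h)⟩
      · rw [pvGetD_nat s j hj]; exact hje
  rw [decide_eq_decide.mpr hchar]
  by_cases h1 : (v + 1) ∈ nums <;> by_cases h2 : (v - 1) ∈ nums <;> simp [h1, h2]
  infer_instance
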